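-- pv_equiv track=rewrite | github.com/rhluttmer/Playfair-Cipher-Term-Project | playfairGraphics.py | putSpacesInAndKillJs
-- ===== SOURCE A (Python) =====
-- def putSpacesInAndKillJs(message):
--     result = ''
--     while len(message) > 1:
--         newPair = message[:2].replace('J', 'I')
--         result += newPair + ' '
--         message = message[2:]
--     if len(message) == 1:
--         result += message.replace('J', 'I')
--     else:
--         result = result[:-1] # to remove ending space
--
--     return result
-- ===== SOURCE B (Python) =====
-- def putSpacesInAndKillJs(message):
--     message = message.replace('J', 'I')
--     result = []
--     for i, ch in enumerate(message):
--         if i > 0 and i % 2 == 0: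
--             result.append(' ')
--         result.append(ch)
--     return ''.join(result)
-- ===== Notes on version B (the rewrite author's own statement) =====
-- stated objective: faster
-- what changed: Replaced the per-pair slicing while-loop with trailing-space trim by one replace of the whole string plus a single per-character pass that inserts a space before every positive even index, joined once at the end.
import Mathlib
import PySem

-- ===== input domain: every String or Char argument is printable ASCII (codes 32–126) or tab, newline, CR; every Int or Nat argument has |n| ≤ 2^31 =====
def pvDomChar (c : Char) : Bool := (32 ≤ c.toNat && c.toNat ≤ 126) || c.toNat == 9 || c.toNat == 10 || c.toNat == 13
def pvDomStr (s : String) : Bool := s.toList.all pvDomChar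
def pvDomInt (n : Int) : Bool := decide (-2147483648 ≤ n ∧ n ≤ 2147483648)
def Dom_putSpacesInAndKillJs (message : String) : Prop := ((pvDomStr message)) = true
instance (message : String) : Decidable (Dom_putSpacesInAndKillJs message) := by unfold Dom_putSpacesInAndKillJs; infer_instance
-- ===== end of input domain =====

-- B replaces A's per-pair slicing while-loop (with trailing-space trim) by one whole-string
-- J→I replace plus a single per-character pass inserting a space before each positive even index.


-- ===== PORT A =====
-- replace('J', 'I') character-wise
def replJ (c : Char) : Char := if c = 'J' then 'I' else c

-- the while loop: result accumulator, message consumed two chars at a time;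
-- afterwards the len==1 / trim-trailing-space branch
def aLoop (message : List Char) (result : List Char) : List Char :=
  if message.length > 1 then
    aLoop (message.drop 2) (result ++ (message.take 2).map replJ ++ [' '])
  else if message.length = 1 then
    result ++ message.map replJ
  else
    result.dropLast
termination_by message.length
decreasing_by simp; omega

def putSpacesInAndKillJs (message : String) : String :=
  String.mk (aLoop message.toList [])

-- ===== PORT B =====
-- the for loop over enumerate(message): i is the index, acc the result list
def bLoop (i : Nat) (l : List Char) (acc : List Char) : List Char :=
  match l with
  | [] => acc
  | c :: t => bLoop (i + 1) t (acc ++ (if i > 0 ∧ i % 2 = 0 then [' '] else []) ++ [c])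

def putSpacesInAndKillJs_alt (message : String) : String :=
  String.mk (bLoop 0 (message.toList.map replJ) [])

-- ===== PRECONDITION & SPEC =====
def Spec_putSpacesInAndKillJs (message : String) (out : String) : Prop := out = putSpacesInAndKillJs_alt message
instance (message : String) (out : String) : Decidable (Spec_putSpacesInAndKillJs message out) := by unfold Spec_putSpacesInAndKillJs; infer_instance

-- ===== CLAIM (what is proved, stated in full; the proofs are below) =====
def Claim_equal_putSpacesInAndKillJs : Prop := ∀ (message : String), Dom_putSpacesInAndKillJs message → Spec_putSpacesInAndKillJs message (putSpacesInAndKillJs message)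

-- ===== LEMMAS AND PROOFS =====

-- common characterisation: spaced pairs of an (already J-replaced) char list
def pairsSpec : List Char → List Char
  | [] => []
  | [c] => [c]
  | a :: b :: t => a :: b :: (if t = [] then [] else ' ' :: pairsSpec t)

theorem bLoop_parity (l : List Char) : ∀ (i j : Nat) (acc : List Char),
    1 ≤ i → 1 ≤ j → i % 2 = j % 2 → bLoop i l acc = bLoop j l acc := by
  induction l with
  | nil => intros; rfl
  | cons c t ih =>
    intro i j acc hi hj hp
    simp only [bLoop]
    have h1 : (if i > 0 ∧ i % 2 = 0 then [' '] else ([] : List Char))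
            = (if j > 0 ∧ j % 2 = 0 then [' '] else []) := by
      split_ifs <;> first | rfl | omega
    rw [h1]
    exact ih (i + 1) (j + 1) _ (by omega) (by omega) (by omega)

theorem bLoop_two (t : List Char) (acc : List Char) :
    bLoop 2 t acc = if t = [] then acc else bLoop 0 t (acc ++ [' ']) := by
  cases t with
  | nil => rfl
  | cons c r =>
    simp only [bLoop, reduceCtorEq, if_false]
    have : bLoop 3 r (acc ++ [' '] ++ [c]) = bLoop 1 r (acc ++ [' '] ++ [c]) :=
      bLoop_parity r 3 1 _ (by omega) (by omega) (by omega)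
    simpa [List.append_assoc] using this

theorem bLoop_spec (l : List Char) : ∀ acc, bLoop 0 l acc = acc ++ pairsSpec l := by
  induction l using pairsSpec.induct with
  | case1 => intro acc; simp [bLoop, pairsSpec]
  | case2 c => intro acc; simp [bLoop, pairsSpec]
  | case3 a b t ih =>
    intro acc
    simp only [bLoop]
    rw [show (0 + 1 + 1 : Nat) = 2 from rfl, bLoop_two]
    by_cases ht : t = []
    · simp [ht, pairsSpec]
    · rw [if_neg ht, ih]
      simp [pairsSpec, ht]

theorem aLoop_spec (l : List Char) : ∀ acc, l ≠ [] →
    aLoop l acc = acc ++ pairsSpec (l.map replJ) := by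
  induction l using pairsSpec.induct with
  | case1 => intro _ h; exact absurd rfl h
  | case2 c => intro acc _; simp [aLoop, pairsSpec]
  | case3 a b t ih =>
    intro acc _
    rw [aLoop]
    simp only [List.length_cons, Nat.lt_add_one_iff, List.drop_succ_cons, List.drop_zero,
      List.take_succ_cons, List.take_zero, List.map_cons, List.map_nil]
    rw [if_pos (by omega)]
    by_cases ht : t = []
    · subst ht
      simp [aLoop, pairsSpec]
    · rw [ih (acc ++ [replJ a, replJ b] ++ [' ']) ht]
      simp [pairsSpec, ht, List.append_assoc]

-- ===== VERDICT (by name: the statement is the Claim_ definition above) =====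
theorem putSpacesInAndKillJs_spec : Claim_equal_putSpacesInAndKillJs := by
  intro message _
  unfold Spec_putSpacesInAndKillJs putSpacesInAndKillJs putSpacesInAndKillJs_alt
  rw [bLoop_spec]
  cases h : message.toList with
  | nil => simp [aLoop, pairsSpec]
  | cons c t =>
    rw [aLoop_spec (c :: t) [] (by simp)]
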